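-- pv_equiv track=rewrite | github.com/dev-sanidhya/AgentOS | packages/templates/src/code-review-agent/templates/crewai/tools/file_analyzer.py | _check_import_organization
-- ===== SOURCE A (Python) =====
-- def _check_import_organization(content: str) -> bool:
--     """Check if imports are well-organized."""
--     lines = content.splitlines()
--     in_import_section = True
--     found_non_import = False
--
--     for line in lines:
--         stripped = line.strip()
--         if not stripped or stripped.startswith('#'):
--             continue
--
--         if stripped.startswith(('import ', 'from ')):
--             if found_non_import:
--                 return False  # Import after non-import code
--         else:
--             found_non_import = True
--             in_import_section = False
--
--     return True
-- ===== SOURCE B (Python) =====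
-- def _check_import_organization(content: str) -> bool:
--     def is_import(s):
--         return s.startswith('import ') or s.startswith('from ')
--     stripped = [ln.strip() for ln in content.splitlines()]
--     sig = [s for s in stripped if s and not s.startswith('#')]
--     imp = [i for i, s in enumerate(sig) if is_import(s)]
--     non = [i for i, s in enumerate(sig) if not is_import(s)]
--     if not imp or not non:
--         return True
--     return max(imp) < min(non)
-- ===== Notes on version B (the rewrite author's own statement) =====
-- stated objective: alternative
-- what changed: Replaces A's stateful early-exit flag scan with building the significant-line list once, collecting import and non-import index lists, and comparing max(import indices) < min(non-import indices).
import Mathlib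
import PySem

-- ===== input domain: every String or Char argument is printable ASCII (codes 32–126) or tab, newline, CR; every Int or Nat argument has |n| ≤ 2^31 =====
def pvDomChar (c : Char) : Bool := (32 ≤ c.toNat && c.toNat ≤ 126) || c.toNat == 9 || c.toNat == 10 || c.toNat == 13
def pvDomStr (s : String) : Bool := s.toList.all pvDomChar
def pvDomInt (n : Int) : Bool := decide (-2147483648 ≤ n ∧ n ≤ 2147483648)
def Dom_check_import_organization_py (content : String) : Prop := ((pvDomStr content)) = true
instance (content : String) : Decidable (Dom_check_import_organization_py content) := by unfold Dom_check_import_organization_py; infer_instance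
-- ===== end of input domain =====

-- B replaces A's stateful early-exit flag scan by an index-list max/min comparison; objective: alternative decomposition (same O(n) cost).

def pvIsImp (s : String) : Bool :=
  PySem.Str.startswith s "import " || PySem.Str.startswith s "from "

-- ===== PORT A =====
-- A's for-loop with the found_non_import flag and early return False
def pvLoopA : List String → Bool → Bool
  | [], _ => true
  | line :: rest, found =>
    let s := PySem.Str.strip line
    if s == "" || PySem.Str.startswith s "#" then pvLoopA rest found
    else if PySem.Str.startswith s "import " || PySem.Str.startswith s "from " then
      (if found then false else pvLoopA rest found)
    else pvLoopA rest true

def check_import_organization_py (content : String) : Bool :=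
  pvLoopA (PySem.Str.splitlines content) false

-- ===== PORT B =====
def check_import_organization_py_alt (content : String) : Bool :=
  let stripped := (PySem.Str.splitlines content).map PySem.Str.strip
  let sig := stripped.filter (fun s => !(s == "") && !(PySem.Str.startswith s "#"))
  let imp := ((PySem.List.enumerate sig 0).filter (fun p => pvIsImp p.2)).map (fun p => p.1)
  let non := ((PySem.List.enumerate sig 0).filter (fun p => !pvIsImp p.2)).map (fun p => p.1)
  match PySem.List.max? imp (fun x => x), PySem.List.min? non (fun x => x) with
  | some M, some m => decide (M < m)
  | _, _ => true

-- ===== PRECONDITION & SPEC =====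
def Spec_check_import_organization_py (content : String) (out : Bool) : Prop := out = check_import_organization_py_alt content
instance (content : String) (out : Bool) : Decidable (Spec_check_import_organization_py content out) := by unfold Spec_check_import_organization_py; infer_instance

-- ===== CLAIM (what is proved, stated in full; the proofs are below) =====
def Claim_equal_check_import_organization_py : Prop := ∀ (content : String), Dom_check_import_organization_py content → Spec_check_import_organization_py content (check_import_organization_py content)

-- ===== LEMMAS AND PROOFS =====

-- A's loop restricted to the significant (non-blank, non-comment) stripped lines
def pvLoopSig : List String → Bool → Bool
  | [], _ => true
  | s :: rest, found =>
    if pvIsImp s then (if found then false else pvLoopSig rest found)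
    else pvLoopSig rest true

-- "every import line comes before every non-import line"
def pvOrdered (sig : List String) : Prop :=
  ∀ (i j : Nat) (hi : i < sig.length) (hj : j < sig.length),
    pvIsImp sig[i] = true → ¬ (pvIsImp sig[j] = true) → i < j

theorem pvLoopA_eq_sig (lines : List String) (found : Bool) :
    pvLoopA lines found =
      pvLoopSig ((lines.map PySem.Str.strip).filter
        (fun s => !(s == "") && !(PySem.Str.startswith s "#"))) found := by
  induction lines generalizing found with
  | nil => rfl
  | cons l rest ih =>
    simp only [pvLoopA, List.map_cons, List.filter_cons]
    by_cases h1 : PySem.Str.strip l = ""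
    · simp [h1, ih]
    · by_cases h2 : PySem.Chars.startswith (PySem.Chars.strip l.toList) ['#'] = true
      · simp [h2, ih]
      · cases found <;> simp [h1, h2, pvLoopSig, pvIsImp, ih]

theorem pvLoopSig_true_eq_all (sig : List String) :
    pvLoopSig sig true = sig.all (fun s => !pvIsImp s) := by
  induction sig with
  | nil => rfl
  | cons s rest ih =>
    by_cases h : pvIsImp s = true <;> simp [pvLoopSig, h, ih]

theorem pvLoopSig_false_iff (sig : List String) :
    pvLoopSig sig false = true ↔ pvOrdered sig := by
  induction sig with
  | nil =>
    simp [pvLoopSig, pvOrdered]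
  | cons s rest ih =>
    by_cases h : pvIsImp s = true
    · simp only [pvLoopSig, h, if_true, Bool.false_eq_true, if_false, ih]
      constructor
      · intro ho i j hi hj himp hnon
        match j with
        | 0 => exact absurd h (by simpa using hnon)
        | j + 1 =>
          match i with
          | 0 => omega
          | i + 1 =>
            have := ho i j (by simpa using hi) (by simpa using hj)
              (by simpa using himp) (by simpa using hnon)
            omega
      · intro ho i j hi hj himp hnon
        have := ho (i+1) (j+1) (by simpa using hi) (by simpa using hj)
          (by simpa using himp) (by simpa using hnon)
        omega
    · simp only [pvLoopSig, h, if_false, Bool.false_eq_true, pvLoopSig_true_eq_all]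
      constructor
      · intro hall i j hi hj himp hnon
        match i with
        | 0 => exact absurd himp h
        | i + 1 =>
          have hi' : i < rest.length := by simpa using hi
          have hmem : rest[i] ∈ rest := List.getElem_mem hi'
          have hall' := (List.all_eq_true.mp hall) _ hmem
          have himp' : pvIsImp rest[i] = true := by simpa using himp
          simp [himp'] at hall' 
      · intro ho
        refine List.all_eq_true.mpr ?_
        intro x hx
        rcases List.mem_iff_getElem.mp hx with ⟨i, hi, rfl⟩
        by_contra hc
        simp only [Bool.not_eq_true', Bool.not_eq_false] at hc
        have := ho (i+1) 0 (by simpa using hi) (by simp)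
          (by simpa using hc) (by simpa using h)
        omega

theorem pvAltCore_iff (sig : List String) :
    (match PySem.List.max? (((PySem.List.enumerate sig 0).filter (fun p => pvIsImp p.2)).map (fun p => p.1)) (fun x => x),
           PySem.List.min? (((PySem.List.enumerate sig 0).filter (fun p => !pvIsImp p.2)).map (fun p => p.1)) (fun x => x) with
     | some M, some m => decide (M < m)
     | _, _ => true) = true ↔ pvOrdered sig := by
  set imp := ((PySem.List.enumerate sig 0).filter (fun p => pvIsImp p.2)).map (fun p => p.1) with himp
  set non := ((PySem.List.enumerate sig 0).filter (fun p => !pvIsImp p.2)).map (fun p => p.1) with hnon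
  have mem_imp : ∀ x : Int, x ∈ imp ↔ ∃ (k : Nat) (hk : k < sig.length), x = (k : Int) ∧ pvIsImp sig[k] = true := by
    intro x
    simp only [himp, List.mem_map, List.mem_filter]
    constructor
    · rintro ⟨p, ⟨hpe, hpi⟩, rfl⟩
      rcases (PySem.List.mem_enumerate_iff _ _ _).mp hpe with ⟨k, hk, rfl⟩
      exact ⟨k, hk, by simp_all⟩
    · rintro ⟨k, hk, rfl, hki⟩
      exact ⟨((k : Int), sig[k]), ⟨(PySem.List.mem_enumerate_iff _ _ _).mpr ⟨k, hk, by simp⟩, hki⟩, rfl⟩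
  have mem_non : ∀ x : Int, x ∈ non ↔ ∃ (k : Nat) (hk : k < sig.length), x = (k : Int) ∧ pvIsImp sig[k] = false := by
    intro x
    simp only [hnon, List.mem_map, List.mem_filter]
    constructor
    · rintro ⟨p, ⟨hpe, hpi⟩, rfl⟩
      rcases (PySem.List.mem_enumerate_iff _ _ _).mp hpe with ⟨k, hk, rfl⟩
      exact ⟨k, hk, by simp_all⟩
    · rintro ⟨k, hk, rfl, hki⟩
      exact ⟨((k : Int), sig[k]), ⟨(PySem.List.mem_enumerate_iff _ _ _).mpr ⟨k, hk, by simp⟩, by simpa using hki⟩, rfl⟩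
  rcases hM : PySem.List.max? imp (fun x => x) with _ | M <;>
    rcases hm : PySem.List.min? non (fun x => x) with _ | m <;>
    simp only [hM, hm]
  · have he : imp = [] := (PySem.List.max?_eq_none_iff _ _).mp hM
    constructor
    · intro _ i j hi hj himpi _
      exact absurd ((mem_imp (i:Int)).mpr ⟨i, hi, rfl, himpi⟩) (by simp [he])
    · intro _; trivial
  · have he : imp = [] := (PySem.List.max?_eq_none_iff _ _).mp hM
    constructor
    · intro _ i j hi hj himpi _
      exact absurd ((mem_imp (i:Int)).mpr ⟨i, hi, rfl, himpi⟩) (by simp [he])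
    · intro _; trivial
  · have he : non = [] := (PySem.List.min?_eq_none_iff _ _).mp hm
    constructor
    · intro _ i j hi hj _ hnoni
      have hf : pvIsImp sig[j] = false := by
        cases hb : pvIsImp sig[j] with
        | false => rfl
        | true => exact absurd hb hnoni
      exact absurd ((mem_non (j:Int)).mpr ⟨j, hj, rfl, hf⟩) (by simp [he])
    · intro _; trivial
  · simp only [decide_eq_true_eq]
    constructor
    · intro hMm i j hi hj himpi hnoni
      have hiI : (i : Int) ∈ imp := (mem_imp _).mpr ⟨i, hi, rfl, himpi⟩
      have hjI : (j : Int) ∈ non := (mem_non _).mpr ⟨j, hj, rfl, by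
        cases hb : pvIsImp sig[j] with
        | false => rfl
        | true => exact absurd hb hnoni⟩
      have h1 : (i : Int) ≤ M := PySem.List.max?_isMax hM _ hiI
      have h2 : m ≤ (j : Int) := PySem.List.min?_isMin hm _ hjI
      have : (i : Int) < (j : Int) := by omega
      exact_mod_cast this
    · intro ho
      have hMmem : M ∈ imp := PySem.List.max?_mem hM
      have hmmem : m ∈ non := PySem.List.min?_mem hm
      rcases (mem_imp M).mp hMmem with ⟨k, hk, rfl, hki⟩
      rcases (mem_non m).mp hmmem with ⟨k', hk', rfl, hk'i⟩
      have : k < k' := ho k k' hk hk' hki (by simp [hk'i])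
      exact_mod_cast this

-- ===== VERDICT (by name: the statement is the Claim_ definition above) =====
theorem check_import_organization_py_spec : Claim_equal_check_import_organization_py := by
  intro content _
  unfold Spec_check_import_organization_py check_import_organization_py check_import_organization_py_alt
  rw [pvLoopA_eq_sig]
  rw [Bool.eq_iff_iff]
  rw [pvLoopSig_false_iff]
  exact (pvAltCore_iff _).symm
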